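-- pv_equiv track=rewrite | github.com/Saurabh-Kumar-NIT/ade-extraction-assignment | src/utils/data_loader.py | extract_entities_from_annotations
-- ===== SOURCE A (Python) =====
-- from typing import Dict, List, Tuple, Set, Optional
--
-- def extract_entities_from_annotations(doc: Dict) -> Dict[str, Set[str]]:
--     """
--     Extract unique entities from a document's original annotations.
--
--     Args:
--         doc (Dict): Document containing annotations.
--
--     Returns:
--         Dict[str, Set[str]]: Entity types mapped to lowercase entity mentions.
--     """
--     entities = {
--         'drugs': set(),
--         'adverse_events': set(),
--         'symptoms': set()
--     }
--
--     for ann in doc['original_annotations']: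
--         if 'type' in ann:
--             if ann['type'] == 'Drug':
--                 entities['drugs'].add(ann['text'].lower())
--             elif ann['type'] == 'ADR':
--                 entities['adverse_events'].add(ann['text'].lower())
--             elif ann['type'] in {'Disease', 'Symptom', 'Finding'}:
--                 entities['symptoms'].add(ann['text'].lower())
--
--     return entities
-- ===== SOURCE B (Python) =====
-- def extract_entities_from_annotations(doc):
--     """
--     Extract unique entities from a document's original annotations.
--     """
--     anns = doc['original_annotations']
--     buckets = {
--         'drugs': ('Drug',),
--         'adverse_events': ('ADR',),
--         'symptoms': ('Disease', 'Symptom', 'Finding'),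
--     }
--     return {name: {ann['text'].lower() for ann in anns if ann.get('type') in types}
--             for name, types in buckets.items()}
-- ===== Notes on version B (the rewrite author's own statement) =====
-- stated objective: idiomatic
-- what changed: Replaces the single fold with a mutated three-set state and an if/elif branch chain by a bucket->accepted-types table and one set comprehension per bucket (three independent filter-map passes).
import Mathlib
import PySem

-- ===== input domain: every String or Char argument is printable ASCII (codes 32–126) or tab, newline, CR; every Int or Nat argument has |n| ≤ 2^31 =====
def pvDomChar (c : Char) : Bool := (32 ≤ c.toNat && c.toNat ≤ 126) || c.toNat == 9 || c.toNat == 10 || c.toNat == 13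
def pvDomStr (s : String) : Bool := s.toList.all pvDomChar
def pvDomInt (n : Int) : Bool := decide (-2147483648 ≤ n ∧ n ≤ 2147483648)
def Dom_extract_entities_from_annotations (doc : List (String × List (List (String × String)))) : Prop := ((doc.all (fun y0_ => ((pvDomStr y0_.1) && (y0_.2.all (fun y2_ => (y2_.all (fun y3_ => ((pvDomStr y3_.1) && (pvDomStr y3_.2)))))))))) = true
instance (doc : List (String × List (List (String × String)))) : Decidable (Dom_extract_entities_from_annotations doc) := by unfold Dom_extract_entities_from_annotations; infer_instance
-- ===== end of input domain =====

-- B replaces A's single fold over a three-set state with a bucket table and one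
-- set comprehension (filter-map pass) per bucket; same return value (idiomatic rewrite).

-- ===== PORT A =====
-- ann['text'].lower() when 'text' is present; the .getD "" default is only reached
-- outside Pre_ (Python raises KeyError there)
def pvTextA (ann : List (String × String)) : String :=
  PySem.Str.lower (((PySem.Dict.mk ann).get? "text").getD "")

def pvAStep (e : List String × List String × List String) (ann : List (String × String)) :
    List String × List String × List String :=
  if (PySem.Dict.mk ann).contains "type" then
    let t := ((PySem.Dict.mk ann).get? "type").getD ""
    if t = "Drug" then (PySem.Set.add e.1 (pvTextA ann), e.2.1, e.2.2)
    else if t = "ADR" then (e.1, PySem.Set.add e.2.1 (pvTextA ann), e.2.2)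
    else if t = "Disease" ∨ t = "Symptom" ∨ t = "Finding" then
      (e.1, e.2.1, PySem.Set.add e.2.2 (pvTextA ann))
    else e
  else e

def extract_entities_from_annotations (doc : List (String × List (List (String × String)))) : List (String × List String) :=
  -- doc['original_annotations']: the .getD [] default is only reached outside Pre_ (KeyError)
  let anns := ((PySem.Dict.mk doc).get? "original_annotations").getD []
  let e := anns.foldl pvAStep ([], [], [])
  [("drugs", e.1), ("adverse_events", e.2.1), ("symptoms", e.2.2)]

-- ===== PORT B =====
-- {ann['text'].lower() for ann in anns if ann.get('type') in types}
def pvBucket (anns : List (List (String × String))) (types : List String) : List String :=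
  PySem.Set.ofList
    ((anns.filter (fun ann => types.contains (((PySem.Dict.mk ann).get? "type").getD ""))).map
      (fun ann => PySem.Str.lower (((PySem.Dict.mk ann).get? "text").getD "")))

def extract_entities_from_annotations_alt (doc : List (String × List (List (String × String)))) : List (String × List String) :=
  let anns := ((PySem.Dict.mk doc).get? "original_annotations").getD []
  [("drugs", pvBucket anns ["Drug"]),
   ("adverse_events", pvBucket anns ["ADR"]),
   ("symptoms", pvBucket anns ["Disease", "Symptom", "Finding"])]

-- ===== PRECONDITION & SPEC =====
-- Pre_ excludes exactly the inputs where Python A raises: a doc without the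
-- 'original_annotations' key (KeyError), or an annotation of a recognized type
-- without a 'text' key (KeyError).
def Pre_extract_entities_from_annotations (doc : List (String × List (List (String × String)))) : Prop :=
  ((PySem.Dict.mk doc).get? "original_annotations").isSome = true ∧
  ∀ ann ∈ ((PySem.Dict.mk doc).get? "original_annotations").getD [],
    (((PySem.Dict.mk ann).get? "type").getD "") ∈ (["Drug", "ADR", "Disease", "Symptom", "Finding"] : List String) →
    (PySem.Dict.mk ann).contains "text" = true
instance (doc : List (String × List (List (String × String)))) : Decidable (Pre_extract_entities_from_annotations doc) := by
  unfold Pre_extract_entities_from_annotations; infer_instance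

def pvWitness_extract_entities_from_annotations : (List (String × List (List (String × String)))) :=
  [("original_annotations", [[("type", "Drug"), ("text", "Aspirin")], [("type", "ADR"), ("text", "Rash")]])]

def Spec_extract_entities_from_annotations (doc : List (String × List (List (String × String)))) (out : List (String × List String)) : Prop := out = extract_entities_from_annotations_alt doc
instance (doc : List (String × List (List (String × String)))) (out : List (String × List String)) : Decidable (Spec_extract_entities_from_annotations doc out) := by unfold Spec_extract_entities_from_annotations; infer_instance

-- ===== CLAIM (what is proved, stated in full; the proofs are below) =====
def Claim_equal_extract_entities_from_annotations : Prop := ∀ (doc : List (String × List (List (String × String)))), Dom_extract_entities_from_annotations doc → Pre_extract_entities_from_annotations doc → Spec_extract_entities_from_annotations doc (extract_entities_from_annotations doc)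

-- ===== LEMMAS AND PROOFS =====

-- the filtered-and-mapped selection B makes for one bucket
def pvSel (anns : List (List (String × String))) (types : List String) : List String :=
  (anns.filter (fun ann => types.contains (((PySem.Dict.mk ann).get? "type").getD ""))).map
    (fun ann => PySem.Str.lower (((PySem.Dict.mk ann).get? "text").getD ""))

lemma pvBucket_eq (anns : List (List (String × String))) (types : List String) :
    pvBucket anns types = PySem.Set.ofList (pvSel anns types) := rfl

-- A's fold with a three-set state decomposes into three independent update-by-selection passes
lemma pvFold_main (anns : List (List (String × String))) :
    ∀ (d a s : List String),
      anns.foldl pvAStep (d, a, s) =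
      (PySem.Set.update d (pvSel anns ["Drug"]),
       PySem.Set.update a (pvSel anns ["ADR"]),
       PySem.Set.update s (pvSel anns ["Disease", "Symptom", "Finding"])) := by
  induction anns with
  | nil => intro d a s; simp [pvSel, PySem.Set.update]
  | cons ann rest ih =>
    intro d a s
    rw [List.foldl_cons]
    cases hg : (PySem.Dict.mk ann).get? "type" with
    | none =>
      have h : (PySem.Dict.mk ann).contains "type" = false := by
        rw [PySem.Dict.contains_eq_isSome_get?, hg]; rfl
      simp [pvAStep, h, ih, pvSel, hg]
    | some t =>
      have h : (PySem.Dict.mk ann).contains "type" = true := by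
        rw [PySem.Dict.contains_eq_isSome_get?, hg]; rfl
      by_cases h1 : t = "Drug"
      · subst h1
        simp [pvAStep, h, hg, ih, pvSel, pvTextA, PySem.Set.update]
      by_cases h2 : t = "ADR"
      · subst h2
        simp [pvAStep, h, hg, ih, pvSel, pvTextA, PySem.Set.update]
      by_cases h3 : t = "Disease" ∨ t = "Symptom" ∨ t = "Finding"
      · rcases h3 with h3 | h3 | h3 <;> subst h3 <;>
          simp [pvAStep, h, hg, ih, pvSel, pvTextA, PySem.Set.update]
      · have hD : ¬ t = "Disease" := fun hh => h3 (Or.inl hh)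
        have hS : ¬ t = "Symptom" := fun hh => h3 (Or.inr (Or.inl hh))
        have hF : ¬ t = "Finding" := fun hh => h3 (Or.inr (Or.inr hh))
        simp [pvAStep, h, hg, ih, pvSel, h1, h2, hD, hS, hF]

-- ===== VERDICT (by name: the statement is the Claim_ definition above) =====
theorem extract_entities_from_annotations_spec : Claim_equal_extract_entities_from_annotations := by
  intro doc _ _
  show extract_entities_from_annotations doc = extract_entities_from_annotations_alt doc
  simp only [extract_entities_from_annotations, extract_entities_from_annotations_alt,
    pvFold_main, pvBucket_eq, PySem.Set.update_nil_left]
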